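-- pv_equiv track=rewrite | github.com/meetbanthia/Legal-Document-Summarization-Meet | classification/pp.py | merge_contiguous_single_chars
-- ===== SOURCE A (Python) =====
-- def remove_spaces_and_periods(abbreviation):
--     '''
--     Cleans abbreviation
--     Cr. P. C. -> CrPC
--     '''
--
--     cleaned_string = abbreviation.replace(" ", "").replace(".", "")
--     return cleaned_string
--
-- def merge_contiguous_single_chars(strings):
--     '''
--     In most of the cases single characters doesnt make any sense, there are single characters that usually represents
--     last names or a char of a abbreviation.
--     That why we are using this behaviour to solve the problem of abbreviation by combining single characters.
--     In this way we can indentify our abbreviation in our text.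
--     This function just merges all those characters so that we can just look at a word later on map that with its full form.
--     '''
--
--     merged_strings = []
--     current_string = ""
--
--     for s in strings:
--         if len(s) == 1:
--             current_string += s
--         else:
--             if len(current_string)==1:
--                 merged_strings.append(current_string)
--                 current_string = ""
--             elif len(current_string)>1:
--                 merged_strings.append(remove_spaces_and_periods(current_string))
--                 current_string = ""
--             merged_strings.append(s)
--
--     if current_string:
--         merged_strings.append(remove_spaces_and_periods(current_string))
--
--     return merged_strings
-- ===== SOURCE B (Python) =====
-- def merge_contiguous_single_chars(strings):
--     # Two-phase: first split the input into maximal runs of single-char /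
--     # non-single-char strings, then emit each run in one go.
--     groups = []
--     for s in strings:
--         single = len(s) == 1
--         if groups and groups[-1][0] == single:
--             groups[-1][1].append(s)
--         else:
--             groups.append((single, [s]))
--     merged = []
--     for single, grp in groups:
--         if single:
--             joined = "".join(grp)
--             if len(joined) == 1:
--                 merged.append(joined)
--             else:
--                 merged.append(joined.replace(" ", "").replace(".", ""))
--         else:
--             merged.extend(grp)
--     return merged
-- ===== Notes on version B (the rewrite author's own statement) =====
-- stated objective: alternative
-- what changed: B replaces A's single accumulator loop by a two-phase decomposition: it first groups the input into maximal runs of single-char vs non-single-char strings, then emits each run in one per-group pass (join+clean a single-char run, copy a non-single run), with no pending-string state threaded through the iteration.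
-- intended difference: On inputs whose maximal trailing run of single-char strings is exactly ['.'] or [' '], A applies remove_spaces_and_periods to that lone character and appends the empty string '' to the result, while B keeps the character unchanged ('.' or ' ') as it does for every identical run occurring earlier in the list; B's value is intended because appending an empty token is useless for the later abbreviation lookup and A itself preserves such lone characters everywhere except at the very end. — e.g. on merge_contiguous_single_chars(["."]): A returns [""], B returns ["."]
import Mathlib
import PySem

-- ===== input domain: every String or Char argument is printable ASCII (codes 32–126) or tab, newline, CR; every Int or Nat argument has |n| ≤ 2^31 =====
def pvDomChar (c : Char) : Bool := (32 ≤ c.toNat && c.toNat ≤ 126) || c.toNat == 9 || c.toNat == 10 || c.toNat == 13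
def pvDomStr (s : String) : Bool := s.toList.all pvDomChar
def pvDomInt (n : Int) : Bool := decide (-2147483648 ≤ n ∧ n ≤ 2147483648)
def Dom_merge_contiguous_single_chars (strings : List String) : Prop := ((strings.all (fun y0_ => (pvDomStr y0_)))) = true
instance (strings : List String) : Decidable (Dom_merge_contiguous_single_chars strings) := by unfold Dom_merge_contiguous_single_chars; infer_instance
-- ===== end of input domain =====

-- B replaces A's single accumulator loop by a two-phase decomposition (group into
-- maximal runs, then emit per run); B intentionally keeps a lone trailing "." or " "
-- unchanged where A cleans it to "" (see D_ below).

-- ===== PORT A =====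
-- abbreviation.replace(" ", "").replace(".", "")
def remove_spaces_and_periods (abbreviation : String) : String :=
  PySem.Str.replace (PySem.Str.replace abbreviation " " "") "." ""

-- the loop body of A; the Python str `current_string` is carried as its list of
-- characters (st.2), so `len(s) == 1` is `s.toList.length = 1` (= Python len, exact)
def stepA (st : List String × List Char) (s : String) : List String × List Char :=
  if s.toList.length = 1 then
    (st.1, st.2 ++ s.toList)
  else if st.2.length = 1 then
    (st.1 ++ [String.ofList st.2] ++ [s], [])
  else if 1 < st.2.length then
    (st.1 ++ [remove_spaces_and_periods (String.ofList st.2)] ++ [s], [])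
  else
    (st.1 ++ [s], [])

-- trailing `if current_string: merged_strings.append(...)`
def finA (st : List String × List Char) : List String :=
  if st.2.isEmpty then st.1 else st.1 ++ [remove_spaces_and_periods (String.ofList st.2)]

def merge_contiguous_single_chars (strings : List String) : List String :=
  finA (strings.foldl stepA ([], []))

-- ===== PORT B =====
-- phase 1 loop body: extend the last group if its flag matches, else open a new group
def stepB (groups : List (Bool × List String)) (s : String) : List (Bool × List String) :=
  let single : Bool := s.toList.length == 1
  match groups.getLast? with
  | some g => if g.1 == single then groups.dropLast ++ [(g.1, g.2 ++ [s])]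
              else groups ++ [(single, [s])]
  | none => groups ++ [(single, [s])]

-- phase 2: what one group contributes to the output
def emitG (g : Bool × List String) : List String :=
  if g.1 then
    let joined := PySem.Str.join "" g.2
    if joined.toList.length = 1 then [joined]
    else [PySem.Str.replace (PySem.Str.replace joined " " "") "." ""]
  else g.2

def merge_contiguous_single_chars_alt (strings : List String) : List String :=
  let groups := strings.foldl stepB []
  groups.foldl (fun merged g => merged ++ emitG g) []

-- ===== PRECONDITION & SPEC =====
-- On inputs whose maximal trailing run of single-char strings is exactly ["."] or
-- [" "], A cleans that lone character and appends "" while B keeps it unchanged (as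
-- A itself does for the same run anywhere earlier in the list); B's value is intended:
-- an empty token is useless for the later abbreviation lookup.
def D_merge_contiguous_single_chars (strings : List String) : Prop :=
  (strings.getLast? = some "." ∨ strings.getLast? = some " ") ∧
  ((strings.dropLast.getLast?.getD "").toList.length ≠ 1)
instance (strings : List String) : Decidable (D_merge_contiguous_single_chars strings) := by
  unfold D_merge_contiguous_single_chars; infer_instance

def Spec_merge_contiguous_single_chars (strings : List String) (out : List String) : Prop :=
  ¬ D_merge_contiguous_single_chars strings → out = merge_contiguous_single_chars_alt strings
instance (strings : List String) (out : List String) : Decidable (Spec_merge_contiguous_single_chars strings out) := by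
  unfold Spec_merge_contiguous_single_chars; infer_instance

def pvDiffWitness_merge_contiguous_single_chars : List String := ["."]
def pvDiffWitnessOut_merge_contiguous_single_chars : (List String) × (List String) := ([""], ["."])

-- ===== CLAIM (what is proved, stated in full; the proofs are below) =====
def Claim_unchanged_merge_contiguous_single_chars : Prop := ∀ (strings : List String), Dom_merge_contiguous_single_chars strings → Spec_merge_contiguous_single_chars strings (merge_contiguous_single_chars strings)
def Claim_changed_merge_contiguous_single_chars : Prop := Dom_merge_contiguous_single_chars (pvDiffWitness_merge_contiguous_single_chars) ∧ D_merge_contiguous_single_chars (pvDiffWitness_merge_contiguous_single_chars) ∧ merge_contiguous_single_chars (pvDiffWitness_merge_contiguous_single_chars) = pvDiffWitnessOut_merge_contiguous_single_chars.1 ∧ merge_contiguous_single_chars_alt (pvDiffWitness_merge_contiguous_single_chars) = pvDiffWitnessOut_merge_contiguous_single_chars.2 ∧ pvDiffWitnessOut_merge_contiguous_single_chars.1 ≠ pvDiffWitnessOut_merge_contiguous_single_chars.2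
def Claim_exact_merge_contiguous_single_chars : Prop := ∀ (strings : List String), Dom_merge_contiguous_single_chars strings → D_merge_contiguous_single_chars strings → merge_contiguous_single_chars strings ≠ merge_contiguous_single_chars_alt strings

-- ===== LEMMAS AND PROOFS =====

-- chars of a run of strings, concatenated
def charsOf (run : List String) : List Char := (run.map String.toList).flatten

-- what A (and B, for a non-final run) emits for a pending run of single chars
def flushMid (cur : List Char) : List String :=
  if cur.length = 1 then [String.ofList cur]
  else if 1 < cur.length then [remove_spaces_and_periods (String.ofList cur)]
  else []

-- reference recursion for A: pending chars cur, rest of input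
def refA : List Char → List String → List String
  | cur, [] => if cur.isEmpty then [] else [remove_spaces_and_periods (String.ofList cur)]
  | cur, s :: t => if s.toList.length = 1 then refA (cur ++ s.toList) t
                   else flushMid cur ++ s :: refA [] t

-- reference recursion for B: differs from refA only in the final flush
def refB : List Char → List String → List String
  | cur, [] => flushMid cur
  | cur, s :: t => if s.toList.length = 1 then refB (cur ++ s.toList) t
                   else flushMid cur ++ s :: refB [] t

-- the trailing-run condition, threaded through the recursion
def T : List Char → List String → Prop
  | cur, [] => cur = ['.'] ∨ cur = [' ']
  | cur, s :: t => if s.toList.length = 1 then T (cur ++ s.toList) t else T [] t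

-- well-formed groups: nonempty, flag correct for every member
def good (gs : List (Bool × List String)) : Prop :=
  ∀ g ∈ gs, g.2 ≠ [] ∧ ∀ s ∈ g.2, (s.toList.length == 1) = g.1

lemma join_empty_sep (xs : List (List Char)) : PySem.Chars.join [] xs = xs.flatten := by
  induction xs with
  | nil => simp [PySem.Chars.join_nil]
  | cons a t ih => cases t with
    | nil => simp [PySem.Chars.join_singleton]
    | cons b u => rw [PySem.Chars.join_cons_cons] at *; simp_all

lemma string_ext (s t : String) (h : s.toList = t.toList) : s = t := by
  rw [← String.ofList_toList (s := s), h, String.ofList_toList]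

lemma charsOf_cons (s : String) (run : List String) :
    charsOf (s :: run) = s.toList ++ charsOf run := by simp [charsOf]

lemma charsOf_concat (run : List String) (s : String) :
    charsOf (run ++ [s]) = charsOf run ++ s.toList := by simp [charsOf]

lemma charsOf_len_of_single (run : List String) (h : ∀ s ∈ run, s.toList.length = 1) :
    (charsOf run).length = run.length := by
  induction run with
  | nil => rfl
  | cons a t ih =>
    rw [charsOf_cons]
    simp only [List.length_append, List.length_cons]
    rw [h a (by simp), ih (fun s hs => h s (by simp [hs]))]
    omega

lemma joined_toList (run : List String) :
    (PySem.Str.join "" run).toList = charsOf run := by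
  rw [PySem.Str.toList_join]
  rw [show ("" : String).toList = ([] : List Char) from rfl, join_empty_sep]
  rfl

lemma joined_eq_ofList (run : List String) :
    PySem.Str.join "" run = String.ofList (charsOf run) := by
  apply string_ext
  rw [joined_toList, String.toList_ofList]

lemma emitG_true (run : List String) (hne : run ≠ []) (h : ∀ s ∈ run, s.toList.length = 1) :
    emitG (true, run) = flushMid (charsOf run) := by
  have hlen : (charsOf run).length = run.length := charsOf_len_of_single run h
  have hpos : 0 < run.length := List.length_pos_of_ne_nil hne
  simp only [emitG, flushMid, joined_eq_ofList, String.toList_ofList, if_true]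
  by_cases h1 : (charsOf run).length = 1
  · simp [h1]
  · have h2 : 1 < (charsOf run).length := by omega
    rw [if_neg h1, if_neg h1, if_pos h2]
    simp only [remove_spaces_and_periods]

lemma A_fold : ∀ (l : List String) (m : List String) (cur : List Char),
    finA (l.foldl stepA (m, cur)) = m ++ refA cur l := by
  intro l
  induction l with
  | nil =>
    intro m cur
    simp only [List.foldl_nil, finA, refA]
    cases cur <;> simp
  | cons s t ih =>
    intro m cur
    rw [List.foldl_cons]
    by_cases hs : s.toList.length = 1
    · rw [show stepA (m, cur) s = (m, cur ++ s.toList) by simp [stepA, hs], ih]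
      simp only [refA]
      rw [if_pos hs]
    · have hstep : stepA (m, cur) s = (m ++ flushMid cur ++ [s], []) := by
        simp only [stepA, flushMid, if_neg hs]
        split_ifs <;> simp
      rw [hstep, ih]
      simp only [refA]
      rw [if_neg hs]
      simp

lemma emit_eq_flatMap (gs : List (Bool × List String)) :
    gs.foldl (fun merged g => merged ++ emitG g) [] = gs.flatMap emitG := by
  simpa using PySem.List.foldl_append_eq_flatMap emitG gs []

lemma good_single (s : String) : ([s] : List String) ≠ [] ∧
    ∀ x ∈ [s], (x.toList.length == 1) = (s.toList.length == 1) := by simp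

lemma good_step (gs : List (Bool × List String)) (s : String) (h : good gs) :
    good (stepB gs s) := by
  unfold stepB
  cases hL : gs.getLast? with
  | none =>
    intro g hg
    rcases List.mem_append.mp hg with h1 | h1
    · exact h g h1
    · simp at h1; subst h1; exact good_single s
  | some g0 =>
    by_cases hb : g0.1 == (s.toList.length == 1)
    · simp only [hb, if_true]
      intro g hg
      rcases List.mem_append.mp hg with h1 | h1
      · exact h g (List.mem_of_mem_dropLast h1)
      · simp at h1; subst h1
        obtain ⟨hne, hmem⟩ := h g0 (List.mem_of_getLast? hL)
        refine ⟨by simp, ?_⟩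
        intro x hx
        rcases List.mem_append.mp hx with h2 | h2
        · exact hmem x h2
        · simp at h2; subst h2
          exact (beq_iff_eq.mp hb).symm
    · simp only [hb, if_false]
      intro g hg
      rcases List.mem_append.mp hg with h1 | h1
      · exact h g h1
      · simp at h1; subst h1; exact good_single s

lemma B_fold : ∀ (l : List String) (gs : List (Bool × List String)), good gs →
    (l.foldl stepB gs).foldl (fun merged g => merged ++ emitG g) [] =
      (match gs.getLast? with
       | some g => if g.1 then gs.dropLast.flatMap emitG ++ refB (charsOf g.2) l
                   else gs.flatMap emitG ++ refB [] l
       | none => gs.flatMap emitG ++ refB [] l) := by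
  intro l
  induction l with
  | nil =>
    intro gs hg
    rw [List.foldl_nil, emit_eq_flatMap]
    cases hL : gs.getLast? with
    | none =>
      have : gs = [] := List.getLast?_eq_none_iff.mp hL
      subst this
      simp [refB, flushMid]
    | some g =>
      obtain ⟨b, run⟩ := g
      have hgs : gs.dropLast ++ [(b, run)] = gs := List.dropLast_append_getLast? _ hL
      obtain ⟨hne, hmem⟩ := hg _ (List.mem_of_getLast? hL)
      cases b with
      | true =>
        simp only [if_true]
        conv_lhs => rw [← hgs]
        rw [List.flatMap_append]
        simp only [refB]
        rw [← emitG_true run hne (fun s hs => by simpa using beq_iff_eq.mp (hmem s hs))]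
        simp
      | false =>
        simp [refB, flushMid]
  | cons s t ih =>
    intro gs hg
    rw [List.foldl_cons, ih (stepB gs s) (good_step gs s hg)]
    cases hL : gs.getLast? with
    | none =>
      have : gs = [] := List.getLast?_eq_none_iff.mp hL
      subst this
      have hstep : stepB [] s = [((s.toList.length == 1), [s])] := by simp [stepB]
      rw [hstep]
      by_cases hs : s.toList.length = 1
      · simp [hs, refB, charsOf]
      · have hsL : ¬ s.length = 1 := fun hc => hs (by simpa using hc)
        have hb : (s.toList.length == 1) = false := by simpa using hsL
        simp only [hb, List.getLast?_singleton]
        simp only [refB]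
        rw [if_neg hs]
        simp [flushMid, emitG, hb, hsL]
    | some g =>
      obtain ⟨b, run⟩ := g
      have hgs : gs.dropLast ++ [(b, run)] = gs := List.dropLast_append_getLast? _ hL
      obtain ⟨hne, hmem⟩ := hg _ (List.mem_of_getLast? hL)
      by_cases hs : s.toList.length = 1
      · have hsb : (s.toList.length == 1) = true := by simp [hs]
        have hsL : s.length = 1 := by simpa using hs
        cases b with
        | true =>
          have hstep : stepB gs s = gs.dropLast ++ [(true, run ++ [s])] := by
            simp only [stepB, hL, hsb]; simp
          rw [hstep, List.getLast?_concat, List.dropLast_concat]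
          simp only [if_true, hL]
          rw [charsOf_concat]
          simp only [refB]
          rw [if_pos hs]
        | false =>
          have hstep : stepB gs s = gs ++ [((s.toList.length == 1), [s])] := by
            simp only [stepB, hL, hsb]; simp
          rw [hstep, List.getLast?_concat, List.dropLast_concat]
          simp only [hsb, if_true, hL, if_false]
          simp only [refB]
          rw [if_pos hs]
          simp [charsOf, hsL]
      · have hsL : ¬ s.length = 1 := fun hc => hs (by simpa using hc)
        have hsb : (s.toList.length == 1) = false := by simpa using hsL
        cases b with
        | true =>
          have hstep : stepB gs s = gs ++ [((s.toList.length == 1), [s])] := by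
            simp only [stepB, hL, hsb]; simp
          rw [hstep, List.getLast?_concat, List.dropLast_concat]
          simp only [hsb, Bool.false_eq_true, if_false, hL, if_true]
          conv_lhs => rw [← hgs]
          simp only [List.flatMap_append, List.flatMap_cons, List.flatMap_nil]
          rw [emitG_true run hne (fun x hx => by simpa using beq_iff_eq.mp (hmem x hx))]
          simp only [refB]
          rw [if_neg hs]
          simp [emitG, hsb, hsL]
        | false =>
          have hstep : stepB gs s = gs.dropLast ++ [(false, run ++ [s])] := by
            simp only [stepB, hL, hsb]; simp
          rw [hstep, List.getLast?_concat, List.dropLast_concat]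
          simp only [if_false, hL]
          conv_rhs => rw [← hgs]
          rw [List.flatMap_append]
          simp only [refB]
          rw [if_neg hs]
          simp [emitG, flushMid, hsL]

lemma replace_single (c o : Char) (h : o ≠ c) : PySem.Chars.replace [c] [o] [] = [c] := by
  simp [PySem.Chars.replace, PySem.Chars.replace.go, h]

lemma clean_single (c : Char) (h1 : c ≠ ' ') (h2 : c ≠ '.') :
    remove_spaces_and_periods (String.ofList [c]) = String.ofList [c] := by
  apply string_ext
  simp only [remove_spaces_and_periods, PySem.Str.toList_replace, String.toList_ofList]
  rw [show (" " : String).toList = [' '] from rfl, show ("." : String).toList = ['.'] from rfl,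
    show ("" : String).toList = ([] : List Char) from rfl]
  rw [replace_single c ' ' (fun h => h1 h.symm), replace_single c '.' (fun h => h2 h.symm)]

lemma refAB : ∀ (l : List String) (cur : List Char), ¬ T cur l → refA cur l = refB cur l := by
  intro l
  induction l with
  | nil =>
    intro cur hT
    simp only [T] at hT
    obtain ⟨h1, h2⟩ := not_or.mp hT
    match cur with
    | [] => simp [refA, refB, flushMid]
    | [c] =>
      have hc1 : c ≠ '.' := fun h => h1 (by rw [h])
      have hc2 : c ≠ ' ' := fun h => h2 (by rw [h])
      simp only [refA, refB, flushMid]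
      rw [clean_single c hc2 hc1]
      simp
    | c :: d :: rest =>
      simp only [refA, refB, flushMid]
      rw [if_neg (show ¬((c :: d :: rest).isEmpty = true) by simp),
        if_neg (show ¬((c :: d :: rest).length = 1) by simp only [List.length_cons]; omega),
        if_pos (show 1 < (c :: d :: rest).length by simp only [List.length_cons]; omega)]
  | cons s t ih =>
    intro cur hT
    simp only [T] at hT
    simp only [refA, refB]
    by_cases hs : s.toList.length = 1
    · rw [if_pos hs] at hT
      rw [if_pos hs, if_pos hs]
      exact ih _ hT
    · rw [if_neg hs] at hT
      rw [if_neg hs, if_neg hs, ih _ hT]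

lemma T_diff : ∀ (l : List String) (cur : List Char), T cur l →
    ∃ pre c, refA cur l = pre ++ [""] ∧ refB cur l = pre ++ [c] ∧ (c = "." ∨ c = " ") := by
  intro l
  induction l with
  | nil =>
    intro cur hT
    simp only [T] at hT
    rcases hT with rfl | rfl
    · exact ⟨[], ".", by decide, by decide, Or.inl rfl⟩
    · exact ⟨[], " ", by decide, by decide, Or.inr rfl⟩
  | cons s t ih =>
    intro cur hT
    simp only [T] at hT
    by_cases hs : s.toList.length = 1
    · rw [if_pos hs] at hT
      obtain ⟨pre, c, hA, hB, hc⟩ := ih _ hT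
      exact ⟨pre, c, by simp only [refA]; rw [if_pos hs]; exact hA,
        by simp only [refB]; rw [if_pos hs]; exact hB, hc⟩
    · rw [if_neg hs] at hT
      obtain ⟨pre, c, hA, hB, hc⟩ := ih _ hT
      refine ⟨flushMid cur ++ s :: pre, c, ?_, ?_, hc⟩
      · simp only [refA]; rw [if_neg hs, hA]; simp
      · simp only [refB]; rw [if_neg hs, hB]; simp

lemma D_cons (s y z : String) (u : List String)
    (h : D_merge_contiguous_single_chars (y :: z :: u)) :
    D_merge_contiguous_single_chars (s :: y :: z :: u) := by
  obtain ⟨h1, h2⟩ := h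
  refine ⟨by simpa [List.getLast?_cons_cons] using h1, ?_⟩
  simpa [List.dropLast_cons₂, List.getLast?_cons_cons] using h2

-- a list whose last element is "." or " " but which contains a non-single-char string
-- has length ≥ 2
lemma D_len2 (t : List String) (hD : D_merge_contiguous_single_chars t)
    (hall : t.all (fun s => s.toList.length == 1) = false) :
    ∃ y z u, t = y :: z :: u := by
  match t with
  | [] => rcases hD.1 with h | h <;> simp at h
  | [x] =>
    exfalso
    have hxl : ¬ x.length = 1 := by simpa using hall
    have hx : x = "." ∨ x = " " := by
      rcases hD.1 with h | h
      · left; simpa using h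
      · right; simpa using h
    rcases hx with rfl | rfl <;> exact hxl (by decide)
  | y :: z :: u => exact ⟨y, z, u, rfl⟩

-- a run of single-char strings whose chars are exactly ['.'] (or [' ']) is ["."] (resp. [" "])
lemma single_run_eq (t : List String) (c : Char)
    (hall : ∀ s ∈ t, s.toList.length = 1) (hc : charsOf t = [c]) :
    t = [String.ofList [c]] := by
  have hlen : (charsOf t).length = t.length := charsOf_len_of_single t hall
  rw [hc] at hlen
  match t, hlen with
  | [x], _ =>
    have hx : x.toList = [c] := by simpa [charsOf] using hc
    rw [string_ext x (String.ofList [c]) (by rw [hx, String.toList_ofList])]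

lemma T_to_D : ∀ (l : List String) (cur : List Char), T cur l →
    (l.all (fun s => s.toList.length == 1) = true ∧
      (cur ++ charsOf l = ['.'] ∨ cur ++ charsOf l = [' '])) ∨
    (l.all (fun s => s.toList.length == 1) = false ∧ D_merge_contiguous_single_chars l) := by
  intro l
  induction l with
  | nil =>
    intro cur hT
    simp only [T] at hT
    left
    exact ⟨rfl, by simpa [charsOf] using hT⟩
  | cons s t ih =>
    intro cur hT
    simp only [T] at hT
    by_cases hs : s.toList.length = 1
    · rw [if_pos hs] at hT
      rcases ih _ hT with ⟨hall, hpick⟩ | ⟨hall, hD⟩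
      · left
        refine ⟨by rw [List.all_cons, hall, show ((s.toList.length == 1) : Bool) = true by simpa using hs]; rfl, ?_⟩
        rw [charsOf_cons, ← List.append_assoc]
        exact hpick
      · right
        refine ⟨by rw [List.all_cons, hall, Bool.and_false], ?_⟩
        obtain ⟨y, z, u, rfl⟩ := D_len2 t hD hall
        exact D_cons s y z u hD
    · have hsb : (s.toList.length == 1) = false := by simpa using hs
      rw [if_neg hs] at hT
      rcases ih [] hT with ⟨hall, hpick⟩ | ⟨hall, hD⟩
      · right
        refine ⟨by rw [List.all_cons, hsb, Bool.false_and], ?_⟩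
        have hall' : ∀ x ∈ t, x.toList.length = 1 := by
          intro x hx
          have := List.all_eq_true.mp hall x hx
          simpa using this
        rcases (by simpa using hpick : charsOf t = ['.'] ∨ charsOf t = [' ']) with hc | hc <;>
        · obtain rfl := single_run_eq t _ hall' hc
          refine ⟨by simp [List.getLast?_cons_cons], ?_⟩
          simpa using hs
      · right
        refine ⟨by rw [List.all_cons, hsb, Bool.false_and], ?_⟩
        obtain ⟨y, z, u, rfl⟩ := D_len2 t hD hall
        exact D_cons s y z u hD

lemma Tinit : ∀ (init : List String) (cur : List Char) (c : String),
    (c = "." ∨ c = " ") → init ≠ [] →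
    (init.getLast?.getD "").toList.length ≠ 1 → T cur (init ++ [c]) := by
  intro init
  induction init with
  | nil => intro _ _ _ h; exact absurd rfl h
  | cons x xs ih =>
    intro cur c hc _ hlast
    cases xs with
    | nil =>
      simp only [List.cons_append, List.nil_append, T]
      rw [if_neg (by simpa using hlast)]
      rcases hc with rfl | rfl <;> decide
    | cons y ys =>
      have h' : (((y :: ys).getLast?.getD "") : String).toList.length ≠ 1 := by
        rwa [List.getLast?_cons_cons] at hlast
      show if x.toList.length = 1 then T (cur ++ x.toList) ((y :: ys) ++ [c]) else T [] ((y :: ys) ++ [c])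
      split_ifs with hx
      · exact ih (cur ++ x.toList) c hc (List.cons_ne_nil y ys) h'
      · exact ih [] c hc (List.cons_ne_nil y ys) h'

lemma D_to_T : ∀ (l : List String), D_merge_contiguous_single_chars l → T [] l := by
  intro l hD
  obtain ⟨hlast, hsec⟩ := hD
  cases hinit : l.dropLast with
  | nil =>
    have hlen : l.length ≤ 1 := by
      have := congrArg List.length hinit
      simp at this
      omega
    match l, hlen with
    | [], _ => rcases hlast with h | h <;> simp at h
    | [x], _ =>
      rcases hlast with h | h <;>
        · simp at h
          subst h
          simp [T]
  | cons z zs =>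
    have hne : l ≠ [] := by
      rcases hlast with h | h <;> exact fun hc => by simp [hc] at h
    rcases hlast with h | h <;>
      · have heq := List.dropLast_append_getLast? _ h
        rw [← heq]
        exact Tinit l.dropLast [] _ (by simp) (by rw [hinit]; simp) hsec

lemma A_eq_ref (strings : List String) : merge_contiguous_single_chars strings = refA [] strings := by
  rw [merge_contiguous_single_chars]
  rw [A_fold]
  simp

lemma B_eq_ref (strings : List String) : merge_contiguous_single_chars_alt strings = refB [] strings := by
  rw [merge_contiguous_single_chars_alt]
  rw [B_fold strings [] (by intro g hg; simp at hg)]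
  simp

lemma D_of_T_nil (strings : List String) (h : T [] strings) :
    D_merge_contiguous_single_chars strings := by
  rcases T_to_D strings [] h with ⟨hall, hpick⟩ | ⟨_, hD⟩
  · have hall' : ∀ x ∈ strings, x.toList.length = 1 := by
      intro x hx
      have := List.all_eq_true.mp hall x hx
      simpa using this
    rcases (by simpa using hpick : charsOf strings = ['.'] ∨ charsOf strings = [' ']) with hc | hc <;>
    · obtain rfl := single_run_eq strings _ hall' hc
      decide
  · exact hD

-- ===== VERDICT (by name: the statement is the Claim_ definition above) =====
theorem merge_contiguous_single_chars_spec : Claim_unchanged_merge_contiguous_single_chars := by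
  intro strings _ hD
  rw [A_eq_ref, B_eq_ref]
  exact refAB _ _ (fun hT => hD (D_of_T_nil _ hT))

theorem merge_contiguous_single_chars_changed : Claim_changed_merge_contiguous_single_chars := by
  unfold Claim_changed_merge_contiguous_single_chars; decide

theorem merge_contiguous_single_chars_tight : Claim_exact_merge_contiguous_single_chars := by
  intro strings _ hD
  rw [A_eq_ref, B_eq_ref]
  obtain ⟨pre, c, hA, hB, hc⟩ := T_diff strings [] (D_to_T strings hD)
  rw [hA, hB]
  intro h
  have := List.append_cancel_left h
  have : ("" : String) = c := by simpa using this
  rcases hc with rfl | rfl <;> simp_all
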